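-- pv_equiv track=rewrite | github.com/CatIIIIIIII/VeriDebug | test.py | gen_neg
-- ===== SOURCE A (Python) =====
-- KEY_WORDS = ['endmodule', 'end', 'endcase', 'else', 'begin']
--
-- def gen_neg(buggy_code):
--     buggy_code_lines = buggy_code.split('\n')
--     buggy_code_lines = [line.strip() for line in buggy_code_lines]
--     buggy_code_lines = [line.strip('\t') for line in buggy_code_lines]
--     buggy_code_lines = [line.strip('\r') for line in buggy_code_lines]
--     buggy_code_lines = [line for line in buggy_code_lines if len(line) > 0]
--     # remove comments
--     buggy_code_lines_neg = [
--         line for line in buggy_code_lines if not line.startswith('//') and not line.startswith('*') and not line.startswith('/*') and line not in KEY_WORDS]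
--     # remove not useful lines
--     buggy_code_lines_neg = [
--         line for line in buggy_code_lines_neg if ' ' in line and len(line.replace(' ', '')) > 4]
--
--     return buggy_code_lines, buggy_code_lines_neg
-- ===== SOURCE B (Python) =====
-- KEY_WORDS = ['endmodule', 'end', 'endcase', 'else', 'begin']
--
--
-- def gen_neg(buggy_code):
--     # Single character-level scan: builds each stripped line directly (leading
--     # whitespace skipped, trailing whitespace held in `trail` and only committed
--     # when more non-space content arrives), while tracking the neg-filter data
--     # (inner-space flag, non-space length) incrementally. No split/strip/replace.
--     lines = []
--     neg = []
--     cur = []          # committed chars of the current stripped line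
--     trail = []        # pending whitespace seen after committed content
--     has_space = False # a ' ' occurs inside the stripped line
--     cnt = 0           # number of chars of cur that are not ' '
--
--     def flush():
--         nonlocal cur, trail, has_space, cnt
--         if cur:
--             line = ''.join(cur)
--             lines.append(line)
--             if not (line.startswith('//') or line.startswith('*')
--                     or line.startswith('/*') or line in KEY_WORDS) \
--                     and has_space and cnt > 4:
--                 neg.append(line)
--         cur, trail, has_space, cnt = [], [], False, 0
--
--     for ch in buggy_code:
--         if ch == '\n':
--             flush()
--         elif ch.isspace():
--             if cur:
--                 trail.append(ch)
--         else:
--             if trail: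
--                 has_space = has_space or (' ' in trail)
--                 cnt += sum(1 for t in trail if t != ' ')
--                 cur.extend(trail)
--                 trail = []
--             cur.append(ch)
--             cnt += 1
--     flush()
--     return lines, neg
-- ===== Notes on version B (the rewrite author's own statement) =====
-- stated objective: alternative
-- what changed: Replaces the newline split plus six staged comprehensions (with per-line strip/replace/substring-search passes) by a single character-level state machine over the string that skips leading whitespace, holds trailing whitespace in a pending buffer, and maintains the neg-filter data (inner-space flag, non-space length) incrementally, emitting each stripped line once.
import Mathlib
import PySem

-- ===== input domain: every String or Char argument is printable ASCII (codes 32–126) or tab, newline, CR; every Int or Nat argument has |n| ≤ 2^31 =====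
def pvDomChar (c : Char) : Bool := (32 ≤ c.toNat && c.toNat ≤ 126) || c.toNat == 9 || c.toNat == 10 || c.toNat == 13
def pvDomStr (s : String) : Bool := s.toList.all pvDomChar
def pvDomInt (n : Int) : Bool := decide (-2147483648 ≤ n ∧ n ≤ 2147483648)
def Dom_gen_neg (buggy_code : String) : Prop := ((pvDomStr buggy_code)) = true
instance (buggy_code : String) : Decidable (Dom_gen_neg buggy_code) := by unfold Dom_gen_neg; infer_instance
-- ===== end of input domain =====

-- B replaces A's split + six staged comprehensions by a single character-level state machine
-- that builds each stripped line and its neg-filter data incrementally; objective: alternative.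

-- ===== PORT A =====
def pvKeyWords : List (List Char) :=
  ["endmodule".toList, "end".toList, "endcase".toList, "else".toList, "begin".toList]

def gen_neg (buggy_code : String) : List String × List String :=
  let lines0 := PySem.Chars.splitOn buggy_code.toList ['\n']
  let lines1 := lines0.map PySem.Chars.strip
  let lines2 := lines1.map (fun line => PySem.Chars.stripChars line ['\t'])
  let lines3 := lines2.map (fun line => PySem.Chars.stripChars line ['\r'])
  let lines4 := lines3.filter (fun line => decide (0 < line.length))
  let neg1 := lines4.filter (fun line =>
    !PySem.Chars.startswith line ['/', '/'] && !PySem.Chars.startswith line ['*'] &&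
    !PySem.Chars.startswith line ['/', '*'] && !pvKeyWords.contains line)
  let neg2 := neg1.filter (fun line =>
    PySem.Chars.isIn [' '] line && decide (4 < (PySem.Chars.replace line [' '] []).length))
  (lines4.map String.ofList, neg2.map String.ofList)

-- ===== PORT B =====
-- machine state: output lists, committed chars of the current stripped line, pending
-- trailing whitespace, inner-space flag, count of non-' ' chars of the committed part
structure PvSt where
  lines : List String
  neg : List String
  cur : List Char
  trail : List Char
  hs : Bool
  cnt : Nat
  deriving DecidableEq, Repr

def pvFlush (s : PvSt) : PvSt :=
  if s.cur.isEmpty then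
    { lines := s.lines, neg := s.neg, cur := [], trail := [], hs := false, cnt := 0 }
  else
    let line := String.ofList s.cur
    let keep := !(PySem.Chars.startswith s.cur ['/', '/'] || PySem.Chars.startswith s.cur ['*'] ||
        PySem.Chars.startswith s.cur ['/', '*'] || pvKeyWords.contains s.cur) && s.hs &&
        decide (4 < s.cnt)
    { lines := s.lines ++ [line],
      neg := if keep then s.neg ++ [line] else s.neg,
      cur := [], trail := [], hs := false, cnt := 0 }

def pvStepC (s : PvSt) (ch : Char) : PvSt :=
  if ch = '\n' then pvFlush s
  else if PySem.Chars.isspace ch then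
    if s.cur.isEmpty then s else { s with trail := s.trail ++ [ch] }
  else
    let s' := if s.trail.isEmpty then s
      else { s with hs := s.hs || s.trail.contains ' ',
                    cnt := s.cnt + (s.trail.filter (fun t => t != ' ')).length,
                    cur := s.cur ++ s.trail, trail := [] }
    { s' with cur := s'.cur ++ [ch], cnt := s'.cnt + 1 }

def gen_neg_alt (buggy_code : String) : List String × List String :=
  let fin := pvFlush (buggy_code.toList.foldl pvStepC ⟨[], [], [], [], false, 0⟩)
  (fin.lines, fin.neg)

-- ===== PRECONDITION & SPEC =====
def Spec_gen_neg (buggy_code : String) (out : List String × List String) : Prop := out = gen_neg_alt buggy_code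
instance (buggy_code : String) (out : List String × List String) : Decidable (Spec_gen_neg buggy_code out) := by unfold Spec_gen_neg; infer_instance

-- ===== CLAIM (what is proved, stated in full; the proofs are below) =====
def Claim_equal_gen_neg : Prop := ∀ (buggy_code : String), Dom_gen_neg buggy_code → Spec_gen_neg buggy_code (gen_neg buggy_code)

-- ===== LEMMAS AND PROOFS =====

-- splitting on one char, recursively (the shape B's scanner follows line by line)
def pvSplitC (c : Char) (pre : List Char) : List Char → List (List Char)
  | [] => [pre]
  | x :: t => if x = c then pre :: pvSplitC c [] t else pvSplitC c (pre ++ [x]) t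

theorem pv_go_split (c : Char) (fuel : Nat) : ∀ (l cur : List Char) (acc : List (List Char)),
    l.length ≤ fuel →
    PySem.Chars.splitOn.go [c] fuel l cur acc = acc.reverse ++ pvSplitC c cur.reverse l := by
  induction fuel with
  | zero =>
    intro l cur acc h
    have : l = [] := by cases l <;> simp_all
    subst this
    simp [PySem.Chars.splitOn.go, pvSplitC]
  | succ n ih =>
    intro l cur acc h
    cases l with
    | nil => simp [PySem.Chars.splitOn.go, pvSplitC]
    | cons x t =>
      by_cases hx : x = c
      · subst hx
        rw [PySem.Chars.splitOn.go]
        simp only [List.isPrefixOf, beq_self_eq_true, Bool.true_and,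
          if_true, List.length_cons, List.drop_succ_cons, List.length_nil, List.drop_zero,
          pvSplitC]
        rw [ih t [] (cur.reverse :: acc) (by simpa using Nat.le_of_succ_le_succ h)]
        simp [pvSplitC]
      · rw [PySem.Chars.splitOn.go]
        have hpre : List.isPrefixOf [c] (x :: t) = false := by
          simp [List.isPrefixOf]
          exact fun hh => absurd hh.symm hx
        rw [hpre]
        simp only [Bool.false_eq_true, if_false]
        rw [ih t (x :: cur) acc (by simpa using Nat.le_of_succ_le_succ h)]
        simp [pvSplitC, hx]

theorem pv_splitOn_singleton (c : Char) (l : List Char) :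
    PySem.Chars.splitOn l [c] = pvSplitC c [] l := by
  rw [PySem.Chars.splitOn, pv_go_split c _ l [] [] (by omega)]
  simp

theorem pv_replace_go (fuel : Nat) : ∀ (l acc : List Char), l.length ≤ fuel →
    PySem.Chars.replace.go [' '] [] fuel l acc = acc.reverse ++ l.filter (fun t => t != ' ') := by
  induction fuel with
  | zero => intro l acc h; have : l = [] := by cases l <;> simp_all
            subst this; simp [PySem.Chars.replace.go]
  | succ n ih =>
    intro l acc h
    cases l with
    | nil => simp [PySem.Chars.replace.go]
    | cons x t =>
      by_cases hx : x = ' '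
      · subst hx
        rw [PySem.Chars.replace.go]
        simp only [List.isPrefixOf, beq_self_eq_true, Bool.true_and,
          if_true, List.length_cons, List.drop_succ_cons, List.length_nil, List.drop_zero,
          List.reverse_nil, List.nil_append]
        rw [ih t _ (by simpa using Nat.le_of_succ_le_succ h)]
        simp
      · rw [PySem.Chars.replace.go]
        have hpre : List.isPrefixOf [' '] (x :: t) = false := by
          simp [List.isPrefixOf]
          exact fun hh => absurd hh.symm hx
        rw [hpre]
        simp only [Bool.false_eq_true, if_false]
        rw [ih t _ (by simpa using Nat.le_of_succ_le_succ h)]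
        simp [hx]

theorem pv_replace_space (l : List Char) :
    PySem.Chars.replace l [' '] [] = l.filter (fun t => t != ' ') := by
  rw [PySem.Chars.replace]
  simp only [List.isEmpty_cons, Bool.false_eq_true, if_false]
  rw [pv_replace_go l.length l [] (le_refl _)]
  simp

theorem pv_isIn_singleton (c : Char) (l : List Char) :
    PySem.Chars.isIn [c] l = l.contains c := by
  by_cases h : c ∈ l
  · rw [(PySem.Chars.isIn_iff_infix _ _).2 ((List.singleton_infix_iff c l).mpr h), eq_comm]
    simpa using h
  · rw [(PySem.Chars.isIn_eq_false_iff _ _).2 (by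
      intro hinf
      exact h ((List.singleton_infix_iff c l).mp hinf)), eq_comm]
    simpa using h

-- the head surviving a dropWhile fails the predicate
theorem pv_head?_dropWhile {α : Type} (p : α → Bool) (l : List α) (a : α)
    (h : (List.dropWhile p l).head? = some a) : p a = false := by
  cases hd : List.dropWhile p l with
  | nil => rw [hd] at h; simp at h
  | cons b t =>
    rw [hd] at h
    simp only [List.head?_cons, Option.some.injEq] at h
    subst h
    have := List.head_dropWhile_not p (l := l) (by simp [hd])
    simpa [hd] using this

-- dropping with a weaker predicate after a stronger dropWhile is a no-op
theorem pv_dropWhile_dropWhile {α : Type} (p q : α → Bool) (h : ∀ x, p x = true → q x = true)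
    (l : List α) : List.dropWhile p (List.dropWhile q l) = List.dropWhile q l := by
  cases hd : List.dropWhile q l with
  | nil => simp
  | cons a t =>
    have ha : q a = false := pv_head?_dropWhile q l a (by simp [hd])
    have hpa : p a = false := by
      cases hp : p a
      · rfl
      · exact absurd (h a hp) (by simp [ha])
    simp [hpa]

-- leading dropWhile (with a predicate implying isspace) is a no-op on a stripped line
theorem pv_dropWhile_strip (p : Char → Bool)
    (h : ∀ x, p x = true → PySem.Chars.isspace x = true) (l : List Char) :
    List.dropWhile p (PySem.Chars.strip l) = PySem.Chars.strip l := by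
  have hpre : PySem.Chars.strip l <+: List.dropWhile PySem.Chars.isspace l := by
    have hs := List.dropWhile_suffix (l := (List.dropWhile PySem.Chars.isspace l).reverse)
      PySem.Chars.isspace
    rw [PySem.Chars.strip, PySem.Chars.lstrip, PySem.Chars.rstrip, ← List.reverse_suffix]
    simpa using hs
  cases hd : PySem.Chars.strip l with
  | nil => simp
  | cons a t =>
    obtain ⟨r, hr⟩ := hpre
    rw [hd] at hr
    have ha : PySem.Chars.isspace a = false :=
      pv_head?_dropWhile PySem.Chars.isspace l a (by rw [← hr]; simp)
    have hpa : p a = false := by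
      cases hp : p a
      · rfl
      · exact absurd (h a hp) (by simp [ha])
    simp [hpa]

-- stripping a single whitespace character from an already-stripped line is a no-op
theorem pv_stripChars_strip (c : Char) (hc : PySem.Chars.isspace c = true) (l : List Char) :
    PySem.Chars.stripChars (PySem.Chars.strip l) [c] = PySem.Chars.strip l := by
  have himp : ∀ x, ([c].contains x) = true → PySem.Chars.isspace x = true := by
    intro x hx
    simp only [List.contains_cons, List.contains_nil, Bool.or_false, beq_iff_eq] at hx
    rwa [hx]
  rw [PySem.Chars.stripChars, pv_dropWhile_strip _ himp]
  have hrev : (PySem.Chars.strip l).reverse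
      = List.dropWhile PySem.Chars.isspace (PySem.Chars.lstrip l).reverse := by
    rw [PySem.Chars.strip, PySem.Chars.rstrip, List.reverse_reverse]
  rw [hrev, pv_dropWhile_dropWhile _ _ himp, ← hrev, List.reverse_reverse]

theorem pv_notEmpty_eq {α : Type} (l : List α) : (!l.isEmpty) = decide (0 < l.length) := by
  cases l <;> simp

-- A's per-line candidate predicate, on the stripped line
def pvCand (s : List Char) : Bool :=
  !(PySem.Chars.startswith s ['/', '/'] || PySem.Chars.startswith s ['*'] ||
    PySem.Chars.startswith s ['/', '*'] || pvKeyWords.contains s) && s.contains ' ' &&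
  decide (4 < (s.filter (fun t => t != ' ')).length)

-- A's two outputs as functions of the raw line list
def pvA1 (ls : List (List Char)) : List String :=
  ((ls.map PySem.Chars.strip).filter (fun s => !s.isEmpty)).map String.ofList
def pvA2 (ls : List (List Char)) : List String :=
  ((ls.map PySem.Chars.strip).filter (fun s => !s.isEmpty && pvCand s)).map String.ofList

theorem pvA1_cons (y : List Char) (r : List (List Char)) : pvA1 (y :: r) = pvA1 [y] ++ pvA1 r := by
  simp only [pvA1, List.map_cons, List.filter_cons, List.map_nil, List.filter_nil]
  split <;> simp

theorem pvA2_cons (y : List Char) (r : List (List Char)) : pvA2 (y :: r) = pvA2 [y] ++ pvA2 r := by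
  simp only [pvA2, List.map_cons, List.filter_cons, List.map_nil, List.filter_nil]
  split <;> simp

-- A computes (pvA1, pvA2) of its split lines
theorem pv_genA (b : String) :
    gen_neg b = (pvA1 (PySem.Chars.splitOn b.toList ['\n']),
                 pvA2 (PySem.Chars.splitOn b.toList ['\n'])) := by
  have htab : PySem.Chars.isspace '\t' = true := by decide
  have hcr : PySem.Chars.isspace '\r' = true := by decide
  rw [gen_neg]
  simp only [List.map_map]
  have hmap : ∀ l : List Char,
      ((fun line => PySem.Chars.stripChars line ['\r']) ∘
        (fun line => PySem.Chars.stripChars line ['\t']) ∘ PySem.Chars.strip) l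
        = PySem.Chars.strip l := by
    intro l
    simp only [Function.comp_apply, pv_stripChars_strip '\t' htab,
      pv_stripChars_strip '\r' hcr]
  rw [List.map_congr_left (fun l _ => hmap l), Prod.mk.injEq, pvA1, pvA2]
  refine ⟨?_, ?_⟩
  · rw [List.filter_congr (fun s _ => (pv_notEmpty_eq s).symm)]
  · rw [List.filter_filter, List.filter_filter]
    refine congrArg _ (List.filter_congr ?_)
    intro s _
    rw [pvCand, ← pv_notEmpty_eq, pv_isIn_singleton, pv_replace_space]
    cases h1 : PySem.Chars.startswith s ['/', '/'] <;>
      cases h2 : PySem.Chars.startswith s ['*'] <;>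
        cases h3 : PySem.Chars.startswith s ['/', '*'] <;>
          cases h4 : pvKeyWords.contains s <;>
            cases h5 : (!s.isEmpty) <;>
              cases h6 : s.contains ' ' <;> simp [h5, h6]

-- rstrip over an appended whitespace / non-whitespace character
theorem pv_rstrip_append_space (x : Char) (hx : PySem.Chars.isspace x = true) (l : List Char) :
    PySem.Chars.rstrip (l ++ [x]) = PySem.Chars.rstrip l := by
  simp [PySem.Chars.rstrip, hx]

theorem pv_rstrip_append_nonspace (x : Char) (hx : PySem.Chars.isspace x = false)
    (l : List Char) : PySem.Chars.rstrip (l ++ [x]) = l ++ [x] := by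
  simp [PySem.Chars.rstrip, hx]

-- the machine invariant: state s is what the scan of partial line ys produces
def pvInv (s : PvSt) (ys : List Char) : Prop :=
  s.cur = PySem.Chars.strip ys ∧
  s.cur ++ s.trail = PySem.Chars.lstrip ys ∧
  (∀ t ∈ s.trail, PySem.Chars.isspace t = true) ∧
  s.hs = s.cur.contains ' ' ∧
  s.cnt = (s.cur.filter (fun t => t != ' ')).length

theorem pvInv_fresh (L N : List String) : pvInv ⟨L, N, [], [], false, 0⟩ [] := by
  refine ⟨rfl, rfl, by simp, rfl, rfl⟩

theorem pv_flush (s : PvSt) (ys : List Char) (h : pvInv s ys) :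
    pvFlush s = { lines := s.lines ++ pvA1 [ys], neg := s.neg ++ pvA2 [ys],
                  cur := [], trail := [], hs := false, cnt := 0 } := by
  obtain ⟨h1, h2, h3, h4, h5⟩ := h
  by_cases hc : s.cur.isEmpty
  · have hstrip : PySem.Chars.strip ys = [] := by
      rw [← h1]; simpa [List.isEmpty_iff] using hc
    simp [pvFlush, hc, pvA1, pvA2, hstrip]
  · have hstrip : ¬ (PySem.Chars.strip ys).isEmpty := by rw [← h1]; exact hc
    rw [pvFlush, if_neg hc]
    simp only [pvA1, pvA2, List.map_cons, List.map_nil, List.filter_cons, List.filter_nil]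
    rw [← h1]
    simp only [List.isEmpty_iff] at hc
    have hne : (!s.cur.isEmpty) = true := by simp [hc]
    rw [hne]
    simp only [Bool.true_and, if_true, h4, h5, pvCand]
    split <;> simp

theorem pv_step (x : Char) (hx : x ≠ '\n') (s : PvSt) (ys : List Char) (h : pvInv s ys) :
    pvInv (pvStepC s x) (ys ++ [x]) ∧ (pvStepC s x).lines = s.lines ∧
      (pvStepC s x).neg = s.neg := by
  obtain ⟨h1, h2, h3, h4, h5⟩ := h
  by_cases hsp : PySem.Chars.isspace x
  · by_cases hc : s.cur.isEmpty
    · have hcur : s.cur = [] := by simpa [List.isEmpty_iff] using hc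
      have htr : s.trail = [] := by
        cases htr : s.trail with
        | nil => rfl
        | cons a r =>
          have hls : PySem.Chars.lstrip ys = a :: r := by rw [← h2, hcur, htr]; rfl
          have hfa : PySem.Chars.isspace a = false := by
            refine pv_head?_dropWhile PySem.Chars.isspace ys a ?_
            rw [← PySem.Chars.lstrip, hls]; rfl
          have := h3 a (by rw [htr]; simp)
          simp [hfa] at this
      have hls0 : PySem.Chars.lstrip ys = [] := by rw [← h2, hcur, htr]; rfl
      have hlsx : PySem.Chars.lstrip (ys ++ [x]) = [] := by
        rw [PySem.Chars.lstrip, List.dropWhile_append]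
        have : (List.dropWhile PySem.Chars.isspace ys).isEmpty := by
          rw [← PySem.Chars.lstrip, hls0]; rfl
        rw [if_pos this]
        simp [hsp]
      have hstepx : pvStepC s x = s := by simp [pvStepC, hx, hsp, hc]
      rw [hstepx]
      refine ⟨⟨?_, ?_, h3, h4, h5⟩, rfl, rfl⟩
      · rw [hcur, PySem.Chars.strip, hlsx]; rfl
      · rw [hlsx, hcur, htr]; rfl
    · have hstepx : pvStepC s x = { s with trail := s.trail ++ [x] } := by
        simp [pvStepC, hx, hsp, hc]
      have hlsne : ¬ (List.dropWhile PySem.Chars.isspace ys).isEmpty := by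
        rw [← PySem.Chars.lstrip, ← h2]
        simp only [List.isEmpty_iff] at hc ⊢
        simp [hc]
      have hlsx : PySem.Chars.lstrip (ys ++ [x]) = PySem.Chars.lstrip ys ++ [x] := by
        rw [PySem.Chars.lstrip, List.dropWhile_append, if_neg (by simpa using hlsne)]
        rfl
      have hstripx : PySem.Chars.strip (ys ++ [x]) = PySem.Chars.strip ys := by
        rw [PySem.Chars.strip, hlsx, pv_rstrip_append_space x hsp]
        rfl
      rw [hstepx]
      refine ⟨⟨by simpa [hstripx] using h1, ?_, ?_, h4, h5⟩, rfl, rfl⟩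
      · show s.cur ++ (s.trail ++ [x]) = _
        rw [hlsx, ← h2, List.append_assoc]
      · intro t ht
        rcases List.mem_append.mp ht with h' | h'
        · exact h3 t h'
        · simp only [List.mem_singleton] at h'; subst h'; exact hsp
  · -- non-whitespace character: commit the pending trail and the char
    have hxs : (x == ' ') = false := by
      cases hxx : x == ' '
      · rfl
      · exfalso; apply hsp
        have : x = ' ' := by simpa using hxx
        subst this; decide
    have hstepx : pvStepC s x =
        { s with cur := s.cur ++ s.trail ++ [x], trail := [],
                 hs := s.hs || s.trail.contains ' ',
                 cnt := s.cnt + (s.trail.filter (fun t => t != ' ')).length + 1 } := by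
      by_cases htr : s.trail.isEmpty
      · have : s.trail = [] := by simpa [List.isEmpty_iff] using htr
        simp [pvStepC, hx, hsp, this]
      · simp [pvStepC, hx, hsp, htr]
    have hlsx : PySem.Chars.lstrip (ys ++ [x]) = s.cur ++ s.trail ++ [x] := by
      rw [PySem.Chars.lstrip, List.dropWhile_append]
      by_cases he : (List.dropWhile PySem.Chars.isspace ys).isEmpty
      · rw [if_pos he]
        have : s.cur ++ s.trail = [] := by
          rw [h2, PySem.Chars.lstrip]; simpa [List.isEmpty_iff] using he
        rw [this]
        simp [hsp]
      · rw [if_neg he, ← PySem.Chars.lstrip, ← h2]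
    have hstripx : PySem.Chars.strip (ys ++ [x]) = s.cur ++ s.trail ++ [x] := by
      rw [PySem.Chars.strip, hlsx, List.append_assoc, ← List.append_assoc,
        pv_rstrip_append_nonspace x (by simpa using hsp)]
    rw [hstepx]
    refine ⟨⟨by simpa using hstripx.symm, ?_, by simp, ?_, ?_⟩, rfl, rfl⟩
    · show (s.cur ++ s.trail ++ [x]) ++ [] = _
      rw [hlsx]; simp
    · have hxne : ¬ (' ' = x) := fun e => by simp [← e] at hxs
      simp [h4, hxne]
    · have hxs'' : (x != ' ') = true := by simpa using hxs
      simp [h5, List.filter_append, hxs'']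
      omega

-- the whole scan followed by the final flush is A's per-line pipeline
theorem pv_scan (l : List Char) : ∀ (s : PvSt) (ys : List Char), pvInv s ys →
    pvFlush (l.foldl pvStepC s) =
      { lines := s.lines ++ pvA1 (pvSplitC '\n' ys l),
        neg := s.neg ++ pvA2 (pvSplitC '\n' ys l),
        cur := [], trail := [], hs := false, cnt := 0 } := by
  induction l with
  | nil =>
    intro s ys h
    simpa [pvSplitC] using pv_flush s ys h
  | cons x t ih =>
    intro s ys h
    by_cases hx : x = '\n'
    · subst hx
      have hfl := pv_flush s ys h
      have hstep : pvStepC s '\n' = pvFlush s := by simp [pvStepC]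
      have hinv0 : pvInv (pvFlush s) [] := by
        rw [hfl]; exact pvInv_fresh _ _
      rw [List.foldl_cons, hstep, ih (pvFlush s) [] hinv0, hfl]
      rw [show pvSplitC '\n' ys ('\n' :: t) = ys :: pvSplitC '\n' [] t from by simp [pvSplitC]]
      rw [pvA1_cons ys (pvSplitC '\n' [] t), pvA2_cons ys (pvSplitC '\n' [] t)]
      simp [List.append_assoc]
    · obtain ⟨hinv, hlines, hneg⟩ := pv_step x hx s ys h
      rw [List.foldl_cons, ih _ (ys ++ [x]) hinv, hlines, hneg]
      simp [pvSplitC, hx]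

theorem gen_neg_eq (b : String) : gen_neg b = gen_neg_alt b := by
  rw [pv_genA, gen_neg_alt]
  rw [pv_scan b.toList ⟨[], [], [], [], false, 0⟩ [] (pvInv_fresh [] [])]
  simp [pv_splitOn_singleton]

-- ===== VERDICT (by name: the statement is the Claim_ definition above) =====
theorem gen_neg_spec : Claim_equal_gen_neg := by
  intro buggy_code _
  unfold Spec_gen_neg
  exact gen_neg_eq buggy_code
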